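-- pv_equiv track=rewrite | github.com/rafal-nowak/matura2023 | matura_2023_przykladowa/main.py | pieces
-- ===== SOURCE A (Python) =====
-- def pieces(position):
--     white, black = ([],[])
--     for row in position:
--         for tile in row:
--             if tile == '.':
--                 pass
--             elif tile == tile.upper():
--                 white.append(tile)
--             else:
--                 black.append(tile.upper())
--     white.sort()
--     black.sort()
--     return white, black
-- ===== SOURCE B (Python) =====
-- def pieces(position):
--     wc, bc = {}, {}
--     for row in position:
--         for tile in row:
--             if tile == '.':
--                 continue
--             if tile == tile.upper():
--                 wc[tile] = wc.get(tile, 0) + 1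
--             else:
--                 k = tile.upper()
--                 bc[k] = bc.get(k, 0) + 1
--     white = [p for k in sorted(wc) for p in [k] * wc[k]]
--     black = [p for k in sorted(bc) for p in [k] * bc[k]]
--     return white, black
-- ===== Notes on version B (the rewrite author's own statement) =====
-- stated objective: alternative
-- what changed: B maintains one frequency dict per colour during the board scan and builds each output by expanding the sorted distinct keys with their counts, instead of appending every piece to a list and sorting the full lists.
import Mathlib
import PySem

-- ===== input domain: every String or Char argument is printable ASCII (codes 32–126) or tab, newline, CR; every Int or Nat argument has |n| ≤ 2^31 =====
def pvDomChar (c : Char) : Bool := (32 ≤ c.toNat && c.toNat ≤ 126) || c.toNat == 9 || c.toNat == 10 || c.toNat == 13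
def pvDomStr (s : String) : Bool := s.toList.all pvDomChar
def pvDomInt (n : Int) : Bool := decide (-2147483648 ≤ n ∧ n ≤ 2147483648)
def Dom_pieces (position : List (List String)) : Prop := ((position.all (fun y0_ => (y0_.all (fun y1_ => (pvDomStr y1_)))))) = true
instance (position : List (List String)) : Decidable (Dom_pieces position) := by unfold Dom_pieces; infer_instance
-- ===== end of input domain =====

-- B replaces A's append-every-piece-then-sort-the-full-lists by per-colour frequency
-- counters expanded along the sorted distinct keys (alternative decomposition, same result).

-- ===== PORT A =====
def pieces (position : List (List String)) : List String × List String :=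
  let wb := position.foldl (fun wb row =>
    row.foldl (fun (wb : List String × List String) tile =>
      if tile == "." then wb
      else if tile == PySem.Str.upper tile then (wb.1 ++ [tile], wb.2)
      else (wb.1, wb.2 ++ [PySem.Str.upper tile])) wb) ([], [])
  (PySem.List.sorted wb.1 (fun x => x) false, PySem.List.sorted wb.2 (fun x => x) false)

-- ===== PORT B =====
def pieces_alt (position : List (List String)) : List String × List String :=
  let d := position.foldl (fun d row =>
    row.foldl (fun (d : PySem.Dict String Int × PySem.Dict String Int) tile =>
      if tile == "." then d
      else if tile == PySem.Str.upper tile then (d.1.insert tile (d.1.getD tile 0 + 1), d.2)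
      -- Python's local 'k = tile.upper()' is inlined here (same value, used twice)
      else (d.1, d.2.insert (PySem.Str.upper tile) (d.2.getD (PySem.Str.upper tile) 0 + 1))) d) (PySem.Dict.empty, PySem.Dict.empty)
  ((PySem.List.sorted d.1.keys (fun x => x) false).flatMap
      (fun k => PySem.List.pyRepeat [k] (d.1.getD k 0)),
   (PySem.List.sorted d.2.keys (fun x => x) false).flatMap
      (fun k => PySem.List.pyRepeat [k] (d.2.getD k 0)))

-- ===== PRECONDITION & SPEC =====
def Spec_pieces (position : List (List String)) (out : List String × List String) : Prop := out = pieces_alt position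
instance (position : List (List String)) (out : List String × List String) : Decidable (Spec_pieces position out) := by unfold Spec_pieces; infer_instance

-- ===== CLAIM (what is proved, stated in full; the proofs are below) =====
def Claim_equal_pieces : Prop := ∀ (position : List (List String)), Dom_pieces position → Spec_pieces position (pieces position)

-- ===== LEMMAS AND PROOFS =====

-- the white tiles (in board order) and the black keys (in board order) of a flat tile list
def whiteSel (l : List String) : List String :=
  l.filter (fun t => t != "." && t == PySem.Str.upper t)
def blackSel (l : List String) : List String :=
  (l.filter (fun t => t != "." && !(t == PySem.Str.upper t))).map PySem.Str.upper

-- the common loop shape of both ports, split into two independent folds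
lemma foldl_split {σ τ : Type} (l : List String) (s : σ × τ)
    (fw : σ → String → σ) (fb : τ → String → τ) :
    l.foldl (fun s t => if t == "." then s
        else if t == PySem.Str.upper t then (fw s.1 t, s.2)
        else (s.1, fb s.2 (PySem.Str.upper t))) s
    = ((whiteSel l).foldl fw s.1, (blackSel l).foldl fb s.2) := by
  induction l generalizing s with
  | nil => rfl
  | cons t l ih =>
    rw [List.foldl_cons]
    by_cases h1 : (t == ".") = true
    · rw [if_pos h1, ih]
      have ht : t = "." := by simpa using h1
      subst ht
      simp [whiteSel, blackSel]
    · have h1' : (t == ".") = false := by simpa using h1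
      by_cases h2 : (t == PySem.Str.upper t) = true
      · rw [if_neg h1, if_pos h2, ih]
        simp [whiteSel, blackSel, h1', h2, bne]
      · have h2' : (t == PySem.Str.upper t) = false := by simpa using h2
        rw [if_neg h1, if_neg h2, ih]
        simp [whiteSel, blackSel, h1', h2', bne]

lemma foldl_append_singleton (l : List String) (a : List String) :
    l.foldl (fun acc x => acc ++ [x]) a = a ++ l := by
  induction l generalizing a with
  | nil => simp
  | cons x l ih => simp [List.foldl_cons, ih]

lemma count_expand (ks : List String) (l : List String) (a : String) (h : ks.Nodup) :
    (ks.flatMap (fun k => List.replicate (l.count k) k)).count a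
    = if a ∈ ks then l.count a else 0 := by
  induction ks with
  | nil => simp
  | cons k ks ih =>
    simp only [List.flatMap_cons, List.count_append, List.count_replicate, List.mem_cons]
    rcases List.nodup_cons.mp h with ⟨hk, hks⟩
    by_cases hak : a = k
    · subst hak
      have : a ∉ ks := hk
      simp [ih hks, this]
    · have : ¬ (k == a) = true := by simp [beq_iff_eq]; exact fun e => hak e.symm
      simp [this, ih hks, hak]

lemma pairwise_le_replicate (n : ℕ) (a : String) :
    (List.replicate n a).Pairwise (· ≤ ·) := by
  induction n with
  | zero => simp
  | succ n ih =>
    simp only [List.replicate_succ, List.pairwise_cons]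
    exact ⟨fun b hb => by rw [List.eq_of_mem_replicate hb], ih⟩

-- sorting a list = expanding the count of each distinct key along the sorted distinct keys
lemma sorted_expand (l : List String) :
    PySem.List.sorted l (fun x => x) false
    = (PySem.List.sorted (PySem.Set.ofList l) (fun x => x) false).flatMap
        (fun k => List.replicate (l.count k) k) := by
  set ks := PySem.List.sorted (PySem.Set.ofList l) (fun x => x) false with hks
  have hknd : ks.Nodup :=
    ((PySem.List.sorted_perm (PySem.Set.ofList l) (fun x => x) false).nodup_iff).mpr
      (PySem.Set.nodup_ofList l)
  have hmem : ∀ a, a ∈ ks ↔ a ∈ l := by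
    intro a
    rw [hks, PySem.List.mem_sorted, PySem.Set.mem_ofList]
  apply PySem.List.sorted_id_eq_of_perm_of_pairwise
  · -- the expansion is a permutation of l
    refine List.perm_iff_count.mpr (fun a => ?_)
    rw [count_expand ks l a hknd]
    by_cases hal : a ∈ l
    · simp [(hmem a).mpr hal]
    · simp [List.count_eq_zero_of_not_mem hal]
  · -- the expansion is weakly increasing
    rw [List.flatMap, List.pairwise_flatten]
    constructor
    · intro t ht
      rcases List.mem_map.mp ht with ⟨k, _, rfl⟩
      exact pairwise_le_replicate _ _
    · have hlt : ks.Pairwise (· < ·) := PySem.List.sorted_ofList_pairwise_lt l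
      refine (List.pairwise_map).mpr (hlt.imp ?_)
      intro k1 k2 h12 x hx y hy
      rw [List.eq_of_mem_replicate hx, List.eq_of_mem_replicate hy]
      exact le_of_lt h12

lemma expand_counter (l : List String) :
    (PySem.List.sorted (PySem.Dict.counter l).keys (fun x => x) false).flatMap
        (fun k => PySem.List.pyRepeat [k] ((PySem.Dict.counter l).getD k 0))
    = PySem.List.sorted l (fun x => x) false := by
  have hf : (fun k => PySem.List.pyRepeat [k] ((PySem.Dict.counter l).getD k 0))
      = (fun k => List.replicate (l.count k) k) := by
    funext k
    rw [PySem.Dict.getD_counter, PySem.List.pyRepeat_singleton]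
    simp
  rw [PySem.Dict.keys_counter, hf, ← sorted_expand l]

-- ===== VERDICT (by name: the statement is the Claim_ definition above) =====
theorem pieces_spec : Claim_equal_pieces := by
  intro position _
  simp only [Spec_pieces, pieces, pieces_alt]
  simp only [← List.foldl_flatten]
  rw [foldl_split (position.flatten) (([], []) : List String × List String)
        (fun w t => w ++ [t]) (fun b t => b ++ [t]),
      foldl_split (position.flatten)
        ((PySem.Dict.empty, PySem.Dict.empty) : PySem.Dict String Int × PySem.Dict String Int)
        (fun d t => d.insert t (d.getD t 0 + 1)) (fun d t => d.insert t (d.getD t 0 + 1))]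
  simp only [foldl_append_singleton, List.nil_append,
    PySem.Dict.foldl_insert_getD_add_one_eq_counter]
  exact Prod.ext (expand_counter _).symm (expand_counter _).symm
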